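-- pv_equiv track=rewrite | github.com/bhaashik/ReducedToCanonicalConvDiff | feat_val_repr/feature_value_representation-ver-2.0.py | aggregate_examples
-- ===== SOURCE A (Python) =====
-- from collections import defaultdict, Counter
-- from typing import Dict, List, Tuple, Optional
--
-- def aggregate_examples(events: List[Dict], relevant_fields: List[str], group_by: str) -> Dict[str, Dict]:
--     """
--     Aggregate example frequencies grouped by event type.
--
--     Params:
--         events: list of dict rows from CSV
--         relevant_fields: list of fields containing example textual data (e.g., form, lemma)
--         group_by: column name to group examples by (usually 'event_type')
--
--     Returns:
--         Dict[event_type, Dict[example_text, count]]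
--     """
--     agg = defaultdict(lambda: defaultdict(int))
--     for ev in events:
--         evt_type = ev.get(group_by)
--         if not evt_type:
--             continue
--         # Compose an example key by joining relevant fields, ignore empty strings
--         example_key = "; ".join(ev[field] for field in relevant_fields if ev.get(field))
--         agg[evt_type][example_key] += 1
--     return agg
-- ===== SOURCE B (Python) =====
-- def aggregate_examples(events, relevant_fields, group_by):
--     # Keep one (event_type, example_key) row per accepted event.
--     rows = [(ev.get(group_by),
--              "; ".join(ev[f] for f in relevant_fields if ev.get(f)))
--             for ev in events if ev.get(group_by)]
--     # Group-then-count: for each distinct type (first-occurrence order),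
--     # gather that type's keys and count each distinct key by brute force.
--     result = {}
--     for t, _ in rows:
--         if t in result:
--             continue
--         keys = [k for tt, k in rows if tt == t]
--         result[t] = {k: keys.count(k) for k in dict.fromkeys(keys)}
--     return result
-- ===== Notes on version B (the rewrite author's own statement) =====
-- stated objective: alternative
-- what changed: Replaces A's single-pass nested defaultdict increments with a group-then-count scheme: flatten to (type,key) rows, then for each distinct type re-scan the rows to gather its keys and count each distinct key with list.count, with no incremental counter at all.
import Mathlib
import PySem

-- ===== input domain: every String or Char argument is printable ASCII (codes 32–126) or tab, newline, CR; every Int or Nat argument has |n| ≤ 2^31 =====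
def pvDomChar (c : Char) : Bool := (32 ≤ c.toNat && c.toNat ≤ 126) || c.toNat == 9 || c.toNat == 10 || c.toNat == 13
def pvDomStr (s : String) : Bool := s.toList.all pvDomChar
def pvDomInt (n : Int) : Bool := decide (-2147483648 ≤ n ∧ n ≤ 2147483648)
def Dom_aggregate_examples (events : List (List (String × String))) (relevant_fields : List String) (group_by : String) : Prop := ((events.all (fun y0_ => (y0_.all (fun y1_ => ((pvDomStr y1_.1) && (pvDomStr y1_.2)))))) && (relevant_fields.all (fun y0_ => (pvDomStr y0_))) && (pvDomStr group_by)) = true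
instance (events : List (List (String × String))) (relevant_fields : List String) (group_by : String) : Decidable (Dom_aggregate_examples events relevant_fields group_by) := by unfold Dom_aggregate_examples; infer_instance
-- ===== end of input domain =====

-- B replaces A's single-pass nested increments with group-then-count: per distinct type it re-scans the rows and counts each distinct key by brute force (alternative decomposition).

-- ===== PORT A =====
-- '"; ".join(ev[field] for field in relevant_fields if ev.get(field))', the genexp both Pythons contain verbatim
def exampleKey (ev : List (String × String)) (relevant_fields : List String) : String :=
  PySem.Str.join "; "
    ((relevant_fields.filter (fun f => !((PySem.Dict.mk ev).getD f "" == ""))).map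
      (fun f => (PySem.Dict.mk ev).getD f ""))

def aggregate_examples (events : List (List (String × String))) (relevant_fields : List String) (group_by : String) : List (String × List (String × Int)) :=
  let agg : PySem.Dict String (PySem.Dict String Int) :=
    events.foldl (fun agg ev =>
      let evt_type := (PySem.Dict.mk ev).getD group_by ""
      if evt_type == "" then agg
      else agg.modify evt_type PySem.Dict.empty
             (fun inner => inner.modify (exampleKey ev relevant_fields) 0 (· + 1)))
      PySem.Dict.empty
  agg.items.map (fun p => (p.1, p.2.items))

-- ===== PORT B =====
def aggregate_examples_alt (events : List (List (String × String))) (relevant_fields : List String) (group_by : String) : List (String × List (String × Int)) :=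
  let rows : List (String × String) :=
    events.filterMap (fun ev =>
      let t := (PySem.Dict.mk ev).getD group_by ""
      if t == "" then none else some (t, exampleKey ev relevant_fields))
  let result : PySem.Dict String (PySem.Dict String Int) :=
    rows.foldl (fun r p =>
      if r.contains p.1 then r
      else
        let keys := (rows.filter (fun q => q.1 == p.1)).map (fun q => q.2)
        r.insert p.1 ((PySem.Set.ofList keys).foldl
            (fun d k => d.insert k (keys.count k : Int)) PySem.Dict.empty))
      PySem.Dict.empty
  result.items.map (fun p => (p.1, p.2.items))

-- ===== PRECONDITION & SPEC =====
def Spec_aggregate_examples (events : List (List (String × String))) (relevant_fields : List String) (group_by : String) (out : List (String × List (String × Int))) : Prop := out = aggregate_examples_alt events relevant_fields group_by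
instance (events : List (List (String × String))) (relevant_fields : List String) (group_by : String) (out : List (String × List (String × Int))) : Decidable (Spec_aggregate_examples events relevant_fields group_by out) := by unfold Spec_aggregate_examples; infer_instance

-- ===== CLAIM (what is proved, stated in full; the proofs are below) =====
def Claim_equal_aggregate_examples : Prop := ∀ (events : List (List (String × String))) (relevant_fields : List String) (group_by : String), Dom_aggregate_examples events relevant_fields group_by → Spec_aggregate_examples events relevant_fields group_by (aggregate_examples events relevant_fields group_by)

-- ===== LEMMAS AND PROOFS =====

-- A's event loop processed as the pair fold over the flattened rows
theorem foldA_filterMap (events : List (List (String × String)))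
    (relevant_fields : List String) (group_by : String)
    (d : PySem.Dict String (PySem.Dict String Int)) :
    events.foldl (fun agg ev =>
      let evt_type := (PySem.Dict.mk ev).getD group_by ""
      if evt_type == "" then agg
      else agg.modify evt_type PySem.Dict.empty
        (fun inner => inner.modify (exampleKey ev relevant_fields) 0 (· + 1))) d
    = (events.filterMap (fun ev =>
        let t := (PySem.Dict.mk ev).getD group_by ""
        if t == "" then none else some (t, exampleKey ev relevant_fields))).foldl
        (fun agg q => agg.modify q.1 PySem.Dict.empty
          (fun inner => inner.modify q.2 0 (· + 1))) d := by
  induction events generalizing d with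
  | nil => rfl
  | cons ev events ih =>
    simp only [List.foldl_cons, List.filterMap_cons]
    cases h : ((PySem.Dict.mk ev).getD group_by "" == "") with
    | true => simp only [if_pos]; exact ih d
    | false =>
      simp only [Bool.false_eq_true, if_neg, not_false_iff, List.foldl_cons]
      exact ih _

-- reading a fold of modify-at-(key a) back at t = folding the modifiers of the rows keyed t
theorem getD_foldl_modify_key {α : Type} (l : List α) (key : α → String)
    (g : α → PySem.Dict String Int → PySem.Dict String Int)
    (r : PySem.Dict String (PySem.Dict String Int)) (t : String) :
    (l.foldl (fun r a => r.modify (key a) PySem.Dict.empty (g a)) r).getD t PySem.Dict.empty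
      = (l.filter (fun a => key a == t)).foldl (fun inner a => g a inner)
          (r.getD t PySem.Dict.empty) := by
  induction l generalizing r with
  | nil => rfl
  | cons a l ih =>
    rw [List.foldl_cons, ih]
    cases ha : (key a == t) with
    | true =>
      have hat : key a = t := by simpa using ha
      subst hat
      simp only [List.filter_cons, ha, if_pos, List.foldl_cons]
      rw [PySem.Dict.getD_modify_self]
    | false =>
      have hat : t ≠ key a := Ne.symm (by simpa using ha)
      simp only [List.filter_cons, ha, Bool.false_eq_true, if_neg, not_false_iff]
      congr 1
      rw [PySem.Dict.getD_modify_of_ne]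
      exact hat

-- B's brute-force inner table {k: keys.count(k) for k in dedup(keys)} IS Counter(keys)
theorem bruteInner_eq_counter (keys : List String) :
    (PySem.Set.ofList keys).foldl
        (fun d k => d.insert k (keys.count k : Int)) PySem.Dict.empty
      = PySem.Dict.counter keys := by
  apply PySem.Dict.ext
  rw [PySem.Dict.items_counter]
  have h := PySem.Dict.items_foldl_insert_fresh (PySem.Set.ofList keys)
    (fun k => k) (fun k => (keys.count k : Int)) PySem.Dict.empty
    (fun a _ => PySem.Dict.contains_empty _)
    (by simp [PySem.Set.nodup_ofList keys])
  simpa using h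

-- a skip-or-insert loop whose inserted value depends only on the key:
-- its items are the fresh keys in first-occurrence order, each paired with g of it
theorem skipfold_items (g : String → PySem.Dict String Int) :
    ∀ (l : List (String × String)) (d : PySem.Dict String (PySem.Dict String Int)),
      d.keys.Nodup → (∀ t ∈ d.keys, d.getD t PySem.Dict.empty = g t) →
      (l.foldl (fun r p => if r.contains p.1 then r else r.insert p.1 (g p.1)) d).items
        = (PySem.Set.update d.keys (l.map Prod.fst)).map (fun t => (t, g t)) := by
  intro l
  induction l with
  | nil =>
    intro d hnd hval
    rw [List.map_nil, PySem.Set.update_nil, List.foldl_nil,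
      PySem.Dict.items_eq_map_keys d hnd PySem.Dict.empty]
    exact List.map_congr_left (fun t ht => by rw [hval t ht])
  | cons p l ih =>
    intro d hnd hval
    rw [List.map_cons, PySem.Set.update_cons, List.foldl_cons]
    cases hc : d.contains p.1 with
    | true =>
      have hmem : p.1 ∈ d.keys := (PySem.Dict.contains_iff_mem_keys d p.1).1 hc
      rw [if_pos rfl, PySem.Set.add_of_mem hmem]
      exact ih d hnd hval
    | false =>
      have hnmem : p.1 ∉ d.keys := fun h => by
        simp [(PySem.Dict.contains_iff_mem_keys d p.1).2 h] at hc
      simp only [Bool.false_eq_true, if_neg, not_false_iff]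
      have hkeys : (d.insert p.1 (g p.1)).keys = d.keys ++ [p.1] :=
        PySem.Dict.keys_insert_of_not_contains d (g p.1) hc
      have hadd : PySem.Set.add d.keys p.1 = d.keys ++ [p.1] := PySem.Set.add_of_not_mem hnmem
      rw [← hadd] at hkeys
      have hnd' : (d.insert p.1 (g p.1)).keys.Nodup := PySem.Dict.nodup_keys_insert d _ _ hnd
      have hval' : ∀ t ∈ (d.insert p.1 (g p.1)).keys,
          (d.insert p.1 (g p.1)).getD t PySem.Dict.empty = g t := by
        intro t ht
        by_cases hteq : t = p.1
        · subst hteq; rw [PySem.Dict.getD_insert_self]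
        · rw [PySem.Dict.getD_insert_of_ne d (g p.1) PySem.Dict.empty hteq]
          rw [hkeys, hadd] at ht
          rcases List.mem_append.1 ht with h | h
          · exact hval t h
          · exact absurd (List.mem_singleton.1 h) hteq
      rw [ih _ hnd' hval', hkeys]

-- ===== VERDICT (by name: the statement is the Claim_ definition above) =====
theorem aggregate_examples_spec : Claim_equal_aggregate_examples := by
  intro events relevant_fields group_by _
  show _ = _
  simp only [aggregate_examples, aggregate_examples_alt]
  rw [foldA_filterMap]
  set ps : List (String × String) := events.filterMap (fun ev =>
      let t := (PySem.Dict.mk ev).getD group_by ""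
      if t == "" then none else some (t, exampleKey ev relevant_fields)) with hps
  congr 1
  -- A side: items characterization
  have hndA : (ps.foldl (fun agg q => agg.modify q.1 PySem.Dict.empty
        (fun inner => inner.modify q.2 (0 : Int) (· + 1))) PySem.Dict.empty).keys.Nodup :=
    PySem.Dict.nodup_keys_foldl_modify_key ps (fun q => q.1) PySem.Dict.empty
      (fun _ q => (fun inner => inner.modify q.2 (0 : Int) (· + 1))) PySem.Dict.empty
      (by rw [PySem.Dict.keys_empty]; exact List.nodup_nil)
  have hkA : (ps.foldl (fun agg q => agg.modify q.1 PySem.Dict.empty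
        (fun inner => inner.modify q.2 (0 : Int) (· + 1))) PySem.Dict.empty).keys
      = PySem.Set.ofList (ps.map Prod.fst) := by
    rw [PySem.Dict.keys_foldl_modify_key ps (fun q => q.1) PySem.Dict.empty
      (fun _ q => (fun inner => inner.modify q.2 (0 : Int) (· + 1)))]
    rw [PySem.Dict.keys_empty, PySem.Set.update_nil_left]
  have hA := PySem.Dict.items_eq_map_keys _ hndA PySem.Dict.empty
  rw [hA, hkA]
  -- B side: items characterization via the skip-or-insert lemma
  have hB := skipfold_items
    (fun t => (PySem.Set.ofList ((ps.filter (fun q => q.1 == t)).map (fun q => q.2))).foldl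
        (fun d k => d.insert k (((ps.filter (fun q => q.1 == t)).map (fun q => q.2)).count k : Int))
        PySem.Dict.empty)
    ps PySem.Dict.empty
    (by rw [PySem.Dict.keys_empty]; exact List.nodup_nil)
    (by intro t ht; rw [PySem.Dict.keys_empty] at ht; exact absurd ht (List.not_mem_nil))
  rw [hB, PySem.Dict.keys_empty, PySem.Set.update_nil_left]
  apply List.map_congr_left
  intro t _
  refine Prod.ext rfl ?_
  show (ps.foldl (fun agg q => agg.modify q.1 PySem.Dict.empty
      (fun inner => inner.modify q.2 (0 : Int) (· + 1))) PySem.Dict.empty).getD t PySem.Dict.empty = _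
  rw [getD_foldl_modify_key ps (fun q => q.1)
    (fun q => (fun inner => inner.modify q.2 (0 : Int) (· + 1)))]
  dsimp only
  rw [bruteInner_eq_counter, PySem.Dict.counter_eq_foldl, List.foldl_map,
    PySem.Dict.getD_empty]
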